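-- pv_equiv track=rewrite | github.com/johBac97/mirex2025-musecoco | utils_midi/remi_utils.py | from_remi_get_bar_idx
-- ===== SOURCE A (Python) =====
-- def from_remi_get_bar_idx(remi_seq):
--     # Get the starting token of each bar
--     start_token_index_of_the_bar = 0
--     bar_id = 0
--     bar_indices = {}
--
--     # bars_token_positions[bar_id] = (start token index of this bar, start token index of next bar)
--     for idx, token in enumerate(remi_seq):
--         if token == "b-1":
--             start_token_index_of_next_bar = idx + 1
--             bar_indices[bar_id] = (
--                 start_token_index_of_the_bar,
--                 start_token_index_of_next_bar,
--             )
--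
--             # Go to the next bar
--             start_token_index_of_the_bar = start_token_index_of_next_bar
--             bar_id = bar_id + 1
--     return bar_indices
-- ===== SOURCE B (Python) =====
-- def from_remi_get_bar_idx(remi_seq):
--     # Pass 1: collect the bar boundary positions (0, then each index after a "b-1").
--     bounds = [0] + [i + 1 for i, t in enumerate(remi_seq) if t == "b-1"]
--     # Pass 2: pair consecutive boundaries, keyed by bar id.
--     return {k: (bounds[k], bounds[k + 1]) for k in range(len(bounds) - 1)}
-- ===== Notes on version B (the rewrite author's own statement) =====
-- stated objective: alternative
-- what changed: Replaces the single stateful loop (carrying current start, bar id and a growing dict) with two passes: first collect the boundary positions after each 'b-1' marker, then build the ranges by pairing consecutive boundaries.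
import Mathlib
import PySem

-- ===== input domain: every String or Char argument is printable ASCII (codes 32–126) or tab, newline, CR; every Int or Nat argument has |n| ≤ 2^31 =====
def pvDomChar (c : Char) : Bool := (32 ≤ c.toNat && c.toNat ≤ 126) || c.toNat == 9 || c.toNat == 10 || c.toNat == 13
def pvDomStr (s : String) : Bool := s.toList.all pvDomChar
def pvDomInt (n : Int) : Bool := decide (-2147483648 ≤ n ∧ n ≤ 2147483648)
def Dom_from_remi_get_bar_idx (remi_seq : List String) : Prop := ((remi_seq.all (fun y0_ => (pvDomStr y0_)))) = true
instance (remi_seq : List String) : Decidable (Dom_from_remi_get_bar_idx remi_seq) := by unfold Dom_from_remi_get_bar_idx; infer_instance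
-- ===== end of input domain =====

-- B replaces A's single stateful loop with two passes: collect boundary positions, then pair consecutive boundaries (alternative decomposition, same cost).


-- ===== PORT A =====
-- dict keys are the bar ids 0,1,2,… inserted in increasing order, so the
-- insertion-order association list is the appended list below.
def from_remi_get_bar_idx (remi_seq : List String) : List (Int × Int × Int) :=
  let st := (PySem.List.enumerate remi_seq 0).foldl
    (fun (st : Int × Int × List (Int × Int × Int)) (p : Int × String) =>
      if p.2 == "b-1" then
        (p.1 + 1, st.2.1 + 1, st.2.2 ++ [(st.2.1, st.1, p.1 + 1)])
      else st)
    (0, 0, [])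
  st.2.2

-- ===== PORT B =====
def from_remi_get_bar_idx_alt (remi_seq : List String) : List (Int × Int × Int) :=
  let bounds : List Int :=
    0 :: ((PySem.List.enumerate remi_seq 0).filter (fun p => p.2 == "b-1")).map (fun p => p.1 + 1)
  (List.range (bounds.length - 1)).map
    (fun (k : Nat) => ((k : Int), bounds.getD k 0, bounds.getD (k + 1) 0))

-- ===== PRECONDITION & SPEC =====
def Spec_from_remi_get_bar_idx (remi_seq : List String) (out : List (Int × Int × Int)) : Prop := out = from_remi_get_bar_idx_alt remi_seq
instance (remi_seq : List String) (out : List (Int × Int × Int)) : Decidable (Spec_from_remi_get_bar_idx remi_seq out) := by unfold Spec_from_remi_get_bar_idx; infer_instance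

-- ===== CLAIM (what is proved, stated in full; the proofs are below) =====
def Claim_equal_from_remi_get_bar_idx : Prop := ∀ (remi_seq : List String), Dom_from_remi_get_bar_idx remi_seq → Spec_from_remi_get_bar_idx remi_seq (from_remi_get_bar_idx remi_seq)

-- ===== LEMMAS AND PROOFS =====

/-- Boundary positions after each "b-1", scanning from index `i`. -/
def pvCuts (i : Int) : List String → List Int
  | [] => []
  | t :: ts => if t == "b-1" then (i + 1) :: pvCuts (i + 1) ts else pvCuts (i + 1) ts

/-- The ranges A emits given the remaining boundary list. -/
def pvPairs (bid start : Int) : List Int → List (Int × Int × Int)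
  | [] => []
  | c :: cs => (bid, start, c) :: pvPairs (bid + 1) c cs

theorem pvCuts_filter (ts : List String) (i : Int) :
    (((PySem.List.enumerate ts i).filter (fun p => p.2 == "b-1")).map (fun p => p.1 + 1))
      = pvCuts i ts := by
  induction ts generalizing i with
  | nil => simp [PySem.List.enumerate_nil, pvCuts]
  | cons t ts ih =>
    rw [PySem.List.enumerate_cons]
    by_cases h : t == "b-1" <;> simp [pvCuts, h, ih]

theorem pvFoldA (ts : List String) (i start bid : Int) (acc : List (Int × Int × Int)) :
    ((PySem.List.enumerate ts i).foldl
      (fun (st : Int × Int × List (Int × Int × Int)) (p : Int × String) =>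
        if p.2 == "b-1" then
          (p.1 + 1, st.2.1 + 1, st.2.2 ++ [(st.2.1, st.1, p.1 + 1)])
        else st)
      (start, bid, acc))
    = ((pvCuts i ts).getLastD start, bid + (pvCuts i ts).length,
        acc ++ pvPairs bid start (pvCuts i ts)) := by
  induction ts generalizing i start bid acc with
  | nil => simp [PySem.List.enumerate_nil, pvCuts, pvPairs]
  | cons t ts ih =>
    rw [PySem.List.enumerate_cons, List.foldl_cons]
    by_cases h : t = "b-1"
    · simp only [pvCuts, h, beq_self_eq_true, if_true, ih, pvPairs, List.getLastD_cons,
        List.length_cons, List.append_assoc, List.singleton_append]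
      refine Prod.ext (by simp) (Prod.ext (by push_cast; ring_nf) (by simp))
    · rw [if_neg (by simp [h]),
        show pvCuts i (t :: ts) = pvCuts (i + 1) ts from by simp [pvCuts, h]]
      exact ih (i + 1) start bid acc

theorem pvPairs_range (cs : List Int) (bid start : Int) :
    pvPairs bid start cs
      = (List.range cs.length).map
          (fun (k : Nat) => (bid + (k : Int), (start :: cs).getD k 0, cs.getD k 0)) := by
  induction cs generalizing bid start with
  | nil => simp [pvPairs]
  | cons c cs ih =>
    rw [pvPairs, List.length_cons, List.range_succ_eq_map, List.map_cons, List.map_map]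
    refine congrArg₂ _ (by simp) ?_
    rw [ih (bid + 1) c]
    apply List.map_congr_left
    intro k _
    simp [Function.comp]
    ring

-- ===== VERDICT (by name: the statement is the Claim_ definition above) =====
theorem from_remi_get_bar_idx_spec : Claim_equal_from_remi_get_bar_idx := by
  intro remi_seq _
  unfold Spec_from_remi_get_bar_idx from_remi_get_bar_idx from_remi_get_bar_idx_alt
  rw [pvFoldA remi_seq 0 0 0 [], pvCuts_filter]
  simp [pvPairs_range]
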